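-- pv_equiv track=rewrite | github.com/tan-cy/diplomacy | Diplomacy.py | diplomacy_attacked
-- ===== SOURCE A (Python) =====
-- def diplomacy_attacked(attackers, current):
--     """
--     attackers is a dictionary {attacking army : city it is attacking}
--     current is a dictionary {army : current location}
--     returns a dictionary {army : [list of armies that want to attack it]}
--     """
--
--     attacked = {}
--
--     for attacker in attackers:
--         for army in current:
--             if attackers.get(attacker) == current.get(army):
--                 if (army in attacked) == False:
--                     att = []
--
--                 if attacked == {}:
--                     att = [attacker]
--                     attacked = {army: att}
--                 else:
--                     if attacked.get(army) == None:
--                         att = [attacker]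
--                     else:
--                         a = attacked.get(army)
--                         att = a + [attacker]
--                     attacked.update({army: sorted(att)})
--
--     return attacked
-- ===== SOURCE B (Python) =====
-- def diplomacy_attacked(attackers, current):
--     # Index attackers by target city and armies by location, then emit each
--     # targeted location's armies with one shared sorted attacker list:
--     # O(A + C + matches) instead of A's O(A*C) with repeated re-sorting.
--     atts_by_loc = {}                      # location -> attackers targeting it, in attacker order
--     for attacker, target in attackers.items():
--         atts_by_loc.setdefault(target, []).append(attacker)
--     armies_by_loc = {}                    # location -> armies stationed there, in current order
--     for army, loc in current.items():
--         armies_by_loc.setdefault(loc, []).append(army)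
--     attacked = {}
--     for loc, atts in atts_by_loc.items(): # locations in first-targeted order
--         satts = sorted(atts)
--         for army in armies_by_loc.get(loc, []):
--             attacked[army] = satts
--     return attacked
-- ===== Notes on version B (the rewrite author's own statement) =====
-- stated objective: faster
-- what changed: Instead of scanning every army for every attacker and re-sorting the growing list on each match, B builds two hash indexes (location->attackers, location->armies) in single passes and emits each targeted location's armies with one sorted attacker list per location.
import Mathlib
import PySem

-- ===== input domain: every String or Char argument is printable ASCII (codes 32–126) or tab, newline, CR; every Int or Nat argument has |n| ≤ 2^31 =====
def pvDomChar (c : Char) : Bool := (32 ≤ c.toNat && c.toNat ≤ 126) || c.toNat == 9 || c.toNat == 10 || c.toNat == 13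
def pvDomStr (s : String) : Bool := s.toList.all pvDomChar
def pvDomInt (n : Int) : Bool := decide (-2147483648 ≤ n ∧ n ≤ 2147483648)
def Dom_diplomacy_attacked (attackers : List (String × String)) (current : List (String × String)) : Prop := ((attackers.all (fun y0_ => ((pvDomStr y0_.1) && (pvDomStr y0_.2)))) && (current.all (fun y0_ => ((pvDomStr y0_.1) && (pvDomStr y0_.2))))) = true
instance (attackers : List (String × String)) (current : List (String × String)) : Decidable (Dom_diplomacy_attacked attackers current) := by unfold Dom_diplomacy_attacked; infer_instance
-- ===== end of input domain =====

-- B replaces A's attacker×army double scan (with a re-sort on every match) by two hash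
-- groupings (location→attackers, location→armies) and a single sort per targeted location.

-- ===== PORT A =====
def diplomacy_attacked (attackers : List (String × String)) (current : List (String × String)) : List (String × List String) :=
  let atk := PySem.Dict.ofList attackers
  let cur := PySem.Dict.ofList current
  let attacked : PySem.Dict String (List String) :=
    atk.keys.foldl (fun attacked attacker =>
      cur.keys.foldl (fun attacked army =>
        if atk.get? attacker == cur.get? army then
          -- (Python's `att = []` for an army not yet in `attacked` is dead: every path re-assigns `att`)
          if attacked == PySem.Dict.empty then
            PySem.Dict.mk [(army, [attacker])]
          else
            match attacked.get? army with
            | none => attacked.insert army (PySem.List.sorted [attacker] (fun x => x))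
            | some a => attacked.insert army (PySem.List.sorted (a ++ [attacker]) (fun x => x))
        else attacked) attacked) PySem.Dict.empty
  attacked.items

-- ===== PORT B =====
def diplomacy_attacked_alt (attackers : List (String × String)) (current : List (String × String)) : List (String × List String) :=
  let atk := PySem.Dict.ofList attackers
  let cur := PySem.Dict.ofList current
  let attsByLoc : PySem.Dict String (List String) :=
    atk.items.foldl (fun d p => d.modify p.2 [] (· ++ [p.1])) PySem.Dict.empty
  let armiesByLoc : PySem.Dict String (List String) :=
    cur.items.foldl (fun d p => d.modify p.2 [] (· ++ [p.1])) PySem.Dict.empty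
  let attacked : PySem.Dict String (List String) :=
    attsByLoc.items.foldl (fun attacked p =>
      let satts := PySem.List.sorted p.2 (fun x => x)
      (armiesByLoc.getD p.1 []).foldl (fun attacked army => attacked.insert army satts) attacked)
      PySem.Dict.empty
  attacked.items

-- ===== PRECONDITION & SPEC =====
def Spec_diplomacy_attacked (attackers : List (String × String)) (current : List (String × String)) (out : List (String × List String)) : Prop := out = diplomacy_attacked_alt attackers current
instance (attackers : List (String × String)) (current : List (String × String)) (out : List (String × List String)) : Decidable (Spec_diplomacy_attacked attackers current out) := by unfold Spec_diplomacy_attacked; infer_instance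

-- ===== CLAIM (what is proved, stated in full; the proofs are below) =====
def Claim_equal_diplomacy_attacked : Prop := ∀ (attackers : List (String × String)) (current : List (String × String)), Dom_diplomacy_attacked attackers current → Spec_diplomacy_attacked attackers current (diplomacy_attacked attackers current)

-- ===== LEMMAS AND PROOFS =====

def sortId (l : List String) : List String := PySem.List.sorted l (fun x => x)

-- attackers (in order) among `as` targeting location t
def pvAttsOf (as : List (String × String)) (t : String) : List String :=
  (as.filter (fun p => p.2 == t)).map (fun p => p.1)

-- (army, location) pairs of `cs` stationed at location t
def pvGroup (cs : List (String × String)) (t : String) : List (String × String) :=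
  cs.filter (fun q => q.2 == t)

-- the common characterisation of both results: for each targeted location, in
-- first-targeted order, its armies (current order) with the sorted attacker list
def pvGroups (as cs : List (String × String)) : List (String × List String) :=
  (PySem.Set.ofList (as.map (fun p => p.2))).flatMap (fun t =>
    (pvGroup cs t).map (fun q => (q.1, sortId (pvAttsOf as t))))

-- A's inner loop over the armies, for one attacker (a, t)
def stepA (cs : List (String × String)) (d : PySem.Dict String (List String)) (a t : String) :
    PySem.Dict String (List String) :=
  cs.foldl (fun d q =>
    if t == q.2 then
      if d == PySem.Dict.empty then PySem.Dict.mk [(q.1, [a])]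
      else
        match d.get? q.1 with
        | none => d.insert q.1 (sortId [a])
        | some v => d.insert q.1 (sortId (v ++ [a]))
    else d) d

def coreA (as cs : List (String × String)) : PySem.Dict String (List String) :=
  as.foldl (fun d p => stepA cs d p.1 p.2) PySem.Dict.empty

-- B's double loop over locations/armies, list-level
def coreB (as cs : List (String × String)) : PySem.Dict String (List String) :=
  (PySem.Set.ofList (as.map (fun p => p.2))).foldl (fun d t =>
    ((pvGroup cs t).map (fun q => q.1)).foldl (fun d x => d.insert x (sortId (pvAttsOf as t))) d)
    PySem.Dict.empty

-- sorting an already sorted list with one element appended = sorting everything at once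
theorem sortId_sorted_snoc (l : List String) (a : String) (h : (l ++ [a]).Nodup) :
    sortId (sortId l ++ [a]) = sortId (l ++ [a]) := by
  apply PySem.List.sorted_eq_of_perm_of_pairwise_lt
  · exact (PySem.List.sorted_perm _ _ _).trans
      (((PySem.List.sorted_perm l (fun x => x) false).append_right [a]).symm)
  · have hnd : (PySem.List.sorted (l ++ [a]) (fun x => x) false).Nodup :=
      (PySem.List.sorted_perm _ _ _).nodup_iff.mpr h
    have hle := PySem.List.sorted_pairwise (xs := l ++ [a]) (key := fun x => x)
    exact (hle.and hnd).imp (fun hab => lt_of_le_of_ne hab.1 hab.2)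

-- A's three branches are a single insert
theorem branch_eq (d : PySem.Dict String (List String)) (x a : String) :
    (if d == PySem.Dict.empty then PySem.Dict.mk [(x, [a])]
     else
       match d.get? x with
       | none => d.insert x (sortId [a])
       | some v => d.insert x (sortId (v ++ [a]))) =
    d.insert x (sortId (d.getD x [] ++ [a])) := by
  by_cases hd : d = PySem.Dict.empty
  · subst hd
    rw [if_pos (by rfl)]
    apply PySem.Dict.ext
    rw [PySem.Dict.items_insert_of_not_contains _ _ (by rfl)]
    rfl
  · have hne : (d == PySem.Dict.empty) = false := by
      cases d with | mk items =>
      cases hi : items with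
      | nil => exact absurd (by simp [PySem.Dict.empty, hi]) hd
      | cons p r =>
        subst hi
        show ((p :: r) == ([] : List (String × List String))) = false
        rfl
    rw [if_neg (by simp [hne])]
    cases hg : d.get? x with
    | none => rw [PySem.Dict.getD_of_get?_eq_none _ _ hg]; rfl
    | some v => rw [PySem.Dict.getD_of_get?_eq_some _ _ hg]

theorem stepA_eq (cs : List (String × String)) (d : PySem.Dict String (List String)) (a t : String) :
    stepA cs d a t =
      (pvGroup cs t).foldl (fun d q => d.insert q.1 (sortId (d.getD q.1 [] ++ [a]))) d := by
  unfold stepA pvGroup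
  rw [PySem.List.foldl_congr_mem _ _
        (fun d (q : String × String) => if t == q.2 then d.insert q.1 (sortId (d.getD q.1 [] ++ [a])) else d) _
        (fun acc q _ => by
          by_cases h : (t == q.2) = true
          · simp only [h, if_true]; exact branch_eq acc q.1 a
          · simp only [h, Bool.false_eq_true, if_false])]
  rw [PySem.List.foldl_if_eq_foldl_filter]
  congr 1
  exact List.filter_congr (fun q _ => by simp [eq_comm])

-- when every key of ks holds value v in d (ks duplicate-free), the value read is constant
theorem foldl_insert_getD_const (ks : List String) : ∀ (d : PySem.Dict String (List String))
    (v : List String) (F : List String → List String), ks.Nodup →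
    (∀ k ∈ ks, d.getD k [] = v) →
    ks.foldl (fun d k => d.insert k (F (d.getD k []))) d =
      ks.foldl (fun d k => d.insert k (F v)) d := by
  induction ks with
  | nil => intro _ _ _ _ _; rfl
  | cons k0 ks ih =>
    intro d v F hnd h
    simp only [List.foldl_cons]
    rw [h k0 (by simp)]
    exact ih _ v F hnd.of_cons (fun k hk => by
      rw [PySem.Dict.getD_insert_of_ne _ _ _
        (fun he => (List.nodup_cons.mp hnd).1 (by rw [← he]; exact hk))]
      exact h k (List.mem_cons_of_mem _ hk))

-- inserting a constant value at keys that are all present updates items in place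
theorem items_foldl_insert_mem (ks : List String) : ∀ (d : PySem.Dict String (List String)) (w : List String),
    (∀ k ∈ ks, d.contains k = true) →
    (ks.foldl (fun d k => d.insert k w) d).items =
      d.items.map (fun p => if p.1 ∈ ks then (p.1, w) else p) := by
  induction ks with
  | nil => intro d w _; simp
  | cons k0 ks ih =>
    intro d w h
    simp only [List.foldl_cons]
    rw [ih _ w (fun k hk => by
      rw [PySem.Dict.contains_insert]
      simp [h k (List.mem_cons_of_mem _ hk)])]
    rw [PySem.Dict.items_insert_of_contains _ _ (h k0 (by simp)), List.map_map]
    apply List.map_congr_left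
    intro p _
    by_cases h0 : p.1 = k0
    · simp [h0]
    · by_cases h1 : p.1 ∈ ks <;> simp [h0, h1, Function.comp]

theorem key_unique (cs : List (String × String)) (hc : (cs.map (fun p => p.1)).Nodup)
    {x l l' : String} (h1 : (x, l) ∈ cs) (h2 : (x, l') ∈ cs) : l = l' := by
  have := List.inj_on_of_nodup_map hc h1 h2 rfl
  exact congrArg Prod.snd this

theorem mem_groupKeys {cs : List (String × String)} {t x : String} :
    x ∈ (pvGroup cs t).map (fun q => q.1) ↔ ∃ p ∈ cs, p.1 = x ∧ p.2 = t := by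
  simp [pvGroup, List.mem_filter]

theorem groupKeys_nodup {cs : List (String × String)} (hc : (cs.map (fun p => p.1)).Nodup)
    (t : String) : ((pvGroup cs t).map (fun q => q.1)).Nodup :=
  (List.Sublist.map _ List.filter_sublist).nodup hc

theorem groupKeys_disjoint {cs : List (String × String)} (hc : (cs.map (fun p => p.1)).Nodup)
    {t t' x : String} (hne : t ≠ t') (h : x ∈ (pvGroup cs t).map (fun q => q.1)) :
    x ∉ (pvGroup cs t').map (fun q => q.1) := by
  intro h'
  obtain ⟨p, hp, hp1, hp2⟩ := mem_groupKeys.mp h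
  obtain ⟨p', hp', hp1', hp2'⟩ := mem_groupKeys.mp h'
  have m1 : (x, t) ∈ cs := by rw [← hp1, ← hp2]; simpa using hp
  have m2 : (x, t') ∈ cs := by rw [← hp1', ← hp2']; simpa using hp'
  exact hne (key_unique cs hc m1 m2)

theorem pvGroups_keys (as cs : List (String × String)) :
    (pvGroups as cs).map (fun p => p.1) =
      (PySem.Set.ofList (as.map (fun p => p.2))).flatMap (fun t => (pvGroup cs t).map (fun q => q.1)) := by
  rw [pvGroups, List.map_flatMap]
  exact List.flatMap_congr (fun t _ => by rw [List.map_map]; rfl)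

theorem pvGroups_keys_nodup (as cs : List (String × String)) (hc : (cs.map (fun p => p.1)).Nodup) :
    ((pvGroups as cs).map (fun p => p.1)).Nodup := by
  rw [pvGroups_keys, List.flatMap_def, List.nodup_flatten]
  constructor
  · intro l hl
    obtain ⟨t, _, rfl⟩ := List.mem_map.mp hl
    exact groupKeys_nodup hc t
  · rw [List.pairwise_map]
    exact (PySem.Set.nodup_ofList (xs := as.map (fun p => p.2))).imp
      (fun hne => fun x hx hx' => groupKeys_disjoint hc hne hx hx')

theorem attsOf_nodup {as : List (String × String)} (ha : (as.map (fun p => p.1)).Nodup)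
    (t : String) : (pvAttsOf as t).Nodup :=
  (List.Sublist.map _ List.filter_sublist).nodup ha

theorem attsOf_sub {as : List (String × String)} {t x : String} (h : x ∈ pvAttsOf as t) :
    x ∈ as.map (fun p => p.1) :=
  (List.Sublist.map _ List.filter_sublist).mem h

theorem attsOf_snoc (as : List (String × String)) (p : String × String) (t : String) :
    pvAttsOf (as ++ [p]) t = pvAttsOf as t ++ (if p.2 == t then [p.1] else []) := by
  rw [pvAttsOf, pvAttsOf, List.filter_append, List.map_append]
  congr 1
  by_cases h : (p.2 == t) = true <;> simp [List.filter, h]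

theorem attsOf_nil_of_not_mem {as : List (String × String)} {t : String}
    (h : t ∉ as.map (fun p => p.2)) : pvAttsOf as t = [] := by
  rw [pvAttsOf, List.filter_eq_nil_iff.mpr, List.map_nil]
  intro p hp hbeq
  exact h (List.mem_map.mpr ⟨p, hp, beq_iff_eq.mp hbeq⟩)

theorem ofList_append_singleton (xs : List String) (t : String) :
    PySem.Set.ofList (xs ++ [t]) = PySem.Set.add (PySem.Set.ofList xs) t := by
  rw [PySem.Set.ofList_eq_foldl, PySem.Set.ofList_eq_foldl, List.foldl_append]
  rfl

theorem mem_pvGroups {as cs : List (String × String)} {t : String} {q : String × String}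
    (ht : t ∈ PySem.Set.ofList (as.map (fun p => p.2))) (hq : q ∈ pvGroup cs t) :
    (q.1, sortId (pvAttsOf as t)) ∈ pvGroups as cs := by
  rw [pvGroups]
  exact List.mem_flatMap.mpr ⟨t, ht, List.mem_map.mpr ⟨q, hq, rfl⟩⟩

theorem charA (cs : List (String × String)) (hc : (cs.map (fun p => p.1)).Nodup) :
    ∀ as : List (String × String), (as.map (fun p => p.1)).Nodup →
      (coreA as cs).items = pvGroups as cs := by
  intro as
  induction as using List.reverseRecOn with
  | nil => intro _; rfl
  | append_singleton as p ih =>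
    intro ha
    rw [List.map_append] at ha
    have has : (as.map (fun p => p.1)).Nodup := (List.nodup_append.mp ha).1
    have hna : p.1 ∉ as.map (fun p => p.1) :=
      (List.nodup_cons.mp (List.nodup_append_comm.mp ha)).1
    have hD : (coreA as cs).items = pvGroups as cs := ih has
    have hkeys : (coreA as cs).keys = (pvGroups as cs).map (fun p => p.1) := by
      simp only [PySem.Dict.keys]; rw [hD]
    have hknd : (coreA as cs).keys.Nodup := by rw [hkeys]; exact pvGroups_keys_nodup as cs hc
    have hstep : coreA (as ++ [p]) cs = stepA cs (coreA as cs) p.1 p.2 := by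
      simp only [coreA, List.foldl_append, List.foldl_cons, List.foldl_nil]
    rw [hstep, stepA_eq,
        ← List.foldl_map (f := fun q : String × String => q.1)
          (g := fun (d : PySem.Dict String (List String)) x =>
            d.insert x (sortId (d.getD x [] ++ [p.1])))]
    by_cases hmem : p.2 ∈ as.map (fun q => q.2)
    · -- location already targeted: every army of the group is present, values update in place
      have hvv : ∀ x ∈ (pvGroup cs p.2).map (fun q => q.1),
          (coreA as cs).getD x [] = sortId (pvAttsOf as p.2) := by
        intro x hx
        obtain ⟨q, hq, rfl⟩ := List.mem_map.mp hx
        exact PySem.Dict.getD_of_mem_items _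
          (by rw [hD]; exact mem_pvGroups ((PySem.Set.mem_ofList _ _).mpr hmem) hq) hknd []
      rw [foldl_insert_getD_const _ _ _ (fun l => sortId (l ++ [p.1]))
            (groupKeys_nodup hc p.2) hvv]
      have hnd2 : (pvAttsOf as p.2 ++ [p.1]).Nodup := by
        rw [List.nodup_append]
        refine ⟨attsOf_nodup has p.2, List.nodup_singleton _, ?_⟩
        intro x hx y hy
        rw [List.mem_singleton] at hy
        subst hy
        intro heq
        exact hna (heq ▸ attsOf_sub hx)
      rw [sortId_sorted_snoc _ _ hnd2]
      have hcont : ∀ x ∈ (pvGroup cs p.2).map (fun q => q.1), (coreA as cs).contains x = true := by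
        intro x hx
        obtain ⟨q, hq, rfl⟩ := List.mem_map.mp hx
        rw [PySem.Dict.contains_iff_mem_keys, hkeys]
        exact List.mem_map.mpr ⟨_, mem_pvGroups ((PySem.Set.mem_ofList _ _).mpr hmem) hq, rfl⟩
      rw [items_foldl_insert_mem _ _ _ hcont, hD]
      -- now a pure computation over pvGroups
      rw [pvGroups, pvGroups, List.map_append]
      simp only [List.map_cons, List.map_nil]
      rw [ofList_append_singleton,
          PySem.Set.add_of_mem ((PySem.Set.mem_ofList _ _).mpr hmem), List.map_flatMap]
      apply List.flatMap_congr
      intro t' _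
      rw [List.map_map]
      apply List.map_congr_left
      intro q hq
      simp only [Function.comp_apply]
      by_cases ht' : t' = p.2
      · have hm : q.1 ∈ (pvGroup cs p.2).map (fun q => q.1) :=
          List.mem_map.mpr ⟨q, ht' ▸ hq, rfl⟩
        rw [if_pos hm, ht', attsOf_snoc]
        simp
      · have hm : q.1 ∉ (pvGroup cs p.2).map (fun q => q.1) := fun hmm =>
          groupKeys_disjoint hc ht' (List.mem_map.mpr ⟨q, hq, rfl⟩) hmm
        rw [if_neg hm, attsOf_snoc]
        rw [show (p.2 == t') = false from by simp [Ne.symm ht']]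
        simp
    · -- fresh location: the whole group is appended
      have hnotin : ∀ x ∈ (pvGroup cs p.2).map (fun q => q.1), x ∉ (coreA as cs).keys := by
        intro x hx hk
        rw [hkeys, pvGroups_keys] at hk
        obtain ⟨t'', ht'', hx''⟩ := List.mem_flatMap.mp hk
        have ht2 : t'' ∈ as.map (fun q => q.2) := (PySem.Set.mem_ofList _ _).mp ht''
        obtain ⟨q1, hq1, h11, h12⟩ := mem_groupKeys.mp hx
        obtain ⟨q2, hq2, h21, h22⟩ := mem_groupKeys.mp hx''
        have m1 : (x, p.2) ∈ cs := by rw [← h11, ← h12]; simpa using hq1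
        have m2 : (x, t'') ∈ cs := by rw [← h21, ← h22]; simpa using hq2
        exact hmem (key_unique cs hc m1 m2 ▸ ht2)
      have hvv : ∀ x ∈ (pvGroup cs p.2).map (fun q => q.1), (coreA as cs).getD x [] = [] :=
        fun x hx => PySem.Dict.getD_of_get?_eq_none _ _
          ((PySem.Dict.get?_eq_none_iff_not_mem_keys _ _).mpr (hnotin x hx))
      rw [foldl_insert_getD_const _ _ _ (fun l => sortId (l ++ [p.1]))
            (groupKeys_nodup hc p.2) hvv]
      rw [PySem.Dict.items_foldl_insert_fresh ((pvGroup cs p.2).map (fun q => q.1))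
            (fun x => x) (fun _ => sortId ([] ++ [p.1])) _
            (fun a ha => Bool.eq_false_iff.mpr
              (fun hct => hnotin a ha ((PySem.Dict.contains_iff_mem_keys _ _).mp hct)))
            (by simpa [List.map_id] using groupKeys_nodup hc p.2)]
      rw [hD]
      rw [pvGroups, pvGroups, List.map_append]
      simp only [List.map_cons, List.map_nil]
      rw [ofList_append_singleton,
          PySem.Set.add_of_not_mem (fun hmm => hmem ((PySem.Set.mem_ofList _ _).mp hmm)),
          List.flatMap_append]
      congr 1
      · apply List.flatMap_congr
        intro t' ht'
        have hne : p.2 ≠ t' := fun he =>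
          hmem (he ▸ (PySem.Set.mem_ofList _ _).mp ht')
        apply List.map_congr_left
        intro q _
        rw [attsOf_snoc, show (p.2 == t') = false from by simp [hne]]
        simp
      · simp only [List.flatMap_cons, List.flatMap_nil, List.append_nil, List.map_map]
        apply List.map_congr_left
        intro q _
        simp only [Function.comp_apply]
        rw [attsOf_snoc, attsOf_nil_of_not_mem hmem]
        simp

theorem buildB_items (cs : List (String × String)) (hc : (cs.map (fun p => p.1)).Nodup)
    (v : String → List String) :
    ∀ (L : List String) (acc : PySem.Dict String (List String)), L.Nodup →
      (∀ t ∈ L, ∀ x ∈ (pvGroup cs t).map (fun q => q.1), acc.contains x = false) →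
      (L.foldl (fun d t => ((pvGroup cs t).map (fun q => q.1)).foldl (fun d x => d.insert x (v t)) d) acc).items =
        acc.items ++ L.flatMap (fun t => ((pvGroup cs t).map (fun q => q.1)).map (fun x => (x, v t))) := by
  intro L
  induction L with
  | nil => intro acc _ _; simp
  | cons t0 L ih =>
    intro acc hnd hfresh
    simp only [List.foldl_cons]
    have h1 : (((pvGroup cs t0).map (fun q => q.1)).foldl (fun d x => d.insert x (v t0)) acc).items =
        acc.items ++ ((pvGroup cs t0).map (fun q => q.1)).map (fun x => (x, v t0)) := by
      rw [PySem.Dict.items_foldl_insert_fresh ((pvGroup cs t0).map (fun q => q.1))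
            (fun x => x) (fun _ => v t0) acc
            (fun a ha => hfresh t0 (by simp) a ha)
            (by simpa [List.map_id] using groupKeys_nodup hc t0)]
    have hkeys' : (((pvGroup cs t0).map (fun q => q.1)).foldl (fun d x => d.insert x (v t0)) acc).keys =
        acc.keys ++ (pvGroup cs t0).map (fun q => q.1) := by
      simp only [PySem.Dict.keys]
      rw [h1, List.map_append, List.map_map]
      simp [Function.comp_def]
    rw [ih _ (List.nodup_cons.mp hnd).2 (fun t' ht' x hx => by
      rw [Bool.eq_false_iff]
      intro hct
      have hk := (PySem.Dict.contains_iff_mem_keys _ _).mp hct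
      rw [hkeys', List.mem_append] at hk
      rcases hk with hk | hk
      · exact absurd ((PySem.Dict.contains_iff_mem_keys _ _).mpr hk)
          (by rw [hfresh t' (List.mem_cons_of_mem _ ht') x hx]; simp)
      · exact groupKeys_disjoint hc
          (fun he => (List.nodup_cons.mp hnd).1 (by rw [← he]; exact ht')) hx hk)]
    rw [h1, List.flatMap_cons, List.append_assoc]

theorem charB (as cs : List (String × String)) (hc : (cs.map (fun p => p.1)).Nodup) :
    (coreB as cs).items = pvGroups as cs := by
  rw [coreB, buildB_items cs hc _ _ _ (PySem.Set.nodup_ofList _)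
        (fun t _ x _ => PySem.Dict.contains_empty x)]
  show [] ++ _ = _
  rw [List.nil_append, pvGroups]
  exact List.flatMap_congr (fun t _ => by rw [List.map_map]; simp [Function.comp_def])

theorem bridgeA (attackers current : List (String × String)) :
    diplomacy_attacked attackers current =
      (coreA (PySem.Dict.ofList attackers).items (PySem.Dict.ofList current).items).items := by
  rw [diplomacy_attacked]
  have hka : (PySem.Dict.ofList attackers : PySem.Dict String String).keys.Nodup :=
    PySem.Dict.nodup_keys_ofList attackers
  have hkc : (PySem.Dict.ofList current : PySem.Dict String String).keys.Nodup :=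
    PySem.Dict.nodup_keys_ofList current
  congr 1
  rw [coreA]
  simp only [PySem.Dict.keys]
  rw [List.foldl_map]
  apply PySem.List.foldl_congr_mem
  intro acc p hp
  have hga : (PySem.Dict.ofList attackers).get? p.1 = some p.2 :=
    PySem.Dict.get?_of_mem_items _ hp hka
  rw [hga, stepA]
  rw [List.foldl_map]
  apply PySem.List.foldl_congr_mem
  intro acc2 q hq
  have hgc : (PySem.Dict.ofList current).get? q.1 = some q.2 :=
    PySem.Dict.get?_of_mem_items _ hq hkc
  rw [hgc]
  rw [show ((some p.2 == some q.2)) = (p.2 == q.2) from by simp]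
  rfl

theorem bridgeB (attackers current : List (String × String)) :
    diplomacy_attacked_alt attackers current =
      (coreB (PySem.Dict.ofList attackers).items (PySem.Dict.ofList current).items).items := by
  rw [diplomacy_attacked_alt]
  congr 1
  rw [coreB]
  -- rewrite the two grouping folds into the keyed form
  rw [show (PySem.Dict.ofList attackers).items.foldl
        (fun (d : PySem.Dict String (List String)) p => d.modify p.2 [] (· ++ [p.1])) PySem.Dict.empty
      = ((PySem.Dict.ofList attackers).items.map (fun p => (p.2, p.1))).foldl
        (fun (d : PySem.Dict String (List String)) p => d.modify p.1 [] (· ++ [p.2])) PySem.Dict.empty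
      from by rw [List.foldl_map]]
  rw [show (PySem.Dict.ofList current).items.foldl
        (fun (d : PySem.Dict String (List String)) p => d.modify p.2 [] (· ++ [p.1])) PySem.Dict.empty
      = ((PySem.Dict.ofList current).items.map (fun p => (p.2, p.1))).foldl
        (fun (d : PySem.Dict String (List String)) p => d.modify p.1 [] (· ++ [p.2])) PySem.Dict.empty
      from by rw [List.foldl_map]]
  set swA := ((PySem.Dict.ofList attackers).items.map (fun p => (p.2, p.1))) with hswA
  set swC := ((PySem.Dict.ofList current).items.map (fun p => (p.2, p.1))) with hswC
  set dA := swA.foldl (fun (d : PySem.Dict String (List String)) p => d.modify p.1 [] (· ++ [p.2])) PySem.Dict.empty with hdA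
  set dC := swC.foldl (fun (d : PySem.Dict String (List String)) p => d.modify p.1 [] (· ++ [p.2])) PySem.Dict.empty with hdC
  have hkeysA : dA.keys = PySem.Set.ofList ((PySem.Dict.ofList attackers).items.map (fun p => p.2)) := by
    rw [hdA, PySem.Dict.keys_foldl_modify_key swA (fun p => p.1) [] (fun _ p v => v ++ [p.2])]
    rw [hswA, List.map_map]
    exact PySem.Set.update_nil_left _
  have hndA : dA.keys.Nodup := by
    rw [hkeysA]; exact PySem.Set.nodup_ofList _
  have hgetA : ∀ t, dA.getD t [] = pvAttsOf (PySem.Dict.ofList attackers).items t := by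
    intro t
    rw [hdA, PySem.Dict.getD_foldl_modify_append swA PySem.Dict.empty t, hswA]
    rw [List.filter_map, List.map_map]
    simp [pvAttsOf, Function.comp_def]
  have hgetC : ∀ t, dC.getD t [] = (pvGroup (PySem.Dict.ofList current).items t).map (fun q => q.1) := by
    intro t
    rw [hdC, PySem.Dict.getD_foldl_modify_append swC PySem.Dict.empty t, hswC]
    rw [List.filter_map, List.map_map]
    simp [pvGroup, Function.comp_def]
  have hitemsA : dA.items =
      (PySem.Set.ofList ((PySem.Dict.ofList attackers).items.map (fun p => p.2))).map
        (fun t => (t, pvAttsOf (PySem.Dict.ofList attackers).items t)) := by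
    rw [PySem.Dict.items_eq_map_keys dA hndA [], hkeysA]
    exact List.map_congr_left (fun t _ => by rw [hgetA])
  rw [hitemsA, List.foldl_map]
  apply PySem.List.foldl_congr_mem
  intro acc t ht
  rw [hgetC]
  rfl

-- ===== VERDICT (by name: the statement is the Claim_ definition above) =====
theorem diplomacy_attacked_spec : Claim_equal_diplomacy_attacked := by
  intro attackers current _
  unfold Spec_diplomacy_attacked
  rw [bridgeA, bridgeB]
  have ha : ((PySem.Dict.ofList attackers).items.map (fun p => p.1)).Nodup := by
    have := PySem.Dict.nodup_keys_ofList (ps := attackers) (κ := String) (ν := String)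
    simpa [PySem.Dict.keys] using this
  have hc : ((PySem.Dict.ofList current).items.map (fun p => p.1)).Nodup := by
    have := PySem.Dict.nodup_keys_ofList (ps := current) (κ := String) (ν := String)
    simpa [PySem.Dict.keys] using this
  rw [charA _ hc _ ha, charB _ _ hc]
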